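/- GENERATED by farm/mkstatement.py from design/units.tsv (unit `prog_main`) and the Specs of Toyh/Spec/*.lean — do not edit.
   THE STATEMENT of the proof unit `prog_main`: the function `prog_main` (28 instructions) satisfies its contract,
   given the contracts of its callees. What the names mean: ProgX/Base/Spec/Basic.lean. The theorem to prove:
   `theorem prog_main_ok : Toyh.Spec.prog_main.Statement`. -/
import ProgX.Base.Spec.Heap
import ProgX.Base.Spec.Libc
import Toyh.Code
import Toyh.Dec.All
import Toyh.Labels
import Toyh.Spec.Toyh
namespace Toyh.Spec.prog_main
open X86 X86.User Asan

/-- The statement of unit `prog_main`. -/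
def Statement : Prop :=
  ∀ (Lay : Layout) (_hLay : Lay.hi = 0x1000000) (μ : Microarch) (_hμ : UserX.MicroOK μ) (u₀ : State)
    (_hcode : HasCodeNat Lay u₀ Toyh.L.prog_main.entry Toyh.Code.code_prog_main.nat Toyh.L.prog_main.size)
    (_h_clamp_length : ∀ (others : List Obj) (frames : List (Nat × FrameLayout)), Calls Lay μ ProgX.Base.WayInv (ProgX.Base.conv u₀) Toyh.L.clamp_length.entry (Toyh.Spec.clamp_length.spec others frames))
    (_h_malloc : ∀ (H : Heap) (rest : List Obj) (frames : List (Nat × FrameLayout)), Calls Lay μ ProgX.Base.WayInv (ProgX.Base.conv u₀) ProgX.Base.L.malloc.entry (ProgX.Base.Spec.malloc.spec H rest frames))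
    (_h_memcpy : ∀ (others : List Obj) (frames : List (Nat × FrameLayout)), Calls Lay μ ProgX.Base.WayInv (ProgX.Base.conv u₀) ProgX.Base.L.memcpy.entry (ProgX.Base.Spec.memcpy.spec others frames))
    (_h_free : ∀ (H : Heap) (rest : List Obj) (frames : List (Nat × FrameLayout)) (n : Nat), Calls Lay μ ProgX.Base.WayInv (ProgX.Base.conv u₀) ProgX.Base.L.free.entry (ProgX.Base.Spec.free.spec H rest frames n)),
    ∀ (H : Heap) (rest : List Obj) (frames : List (Nat × FrameLayout)), Calls Lay μ ProgX.Base.WayInv (ProgX.Base.conv u₀) Toyh.L.prog_main.entry (Toyh.Spec.prog_main.spec H rest frames)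

end Toyh.Spec.prog_main
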